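-- pv_equiv track=rewrite | github.com/LiRiordan/Partial_flag_Schubert | PycharmProjects/PartialFlagSchubert/main.py | levels
-- ===== SOURCE A (Python) =====
-- def levels(i):
--     Output = []
--     max = sorted(i,reverse=True)[0]
--     Max = int(max)
--     for j in range(Max+1,0,-1):
--         P = []
--         for k in range(len(i)):
--             if int(i[k]) == j-1:
--                 P.append(k)
--         Output += sorted(P,reverse=True)
--     return Output
-- ===== SOURCE B (Python) =====
-- def levels(i):
--     # Group indices by value in one pass, then emit groups by value descending,
--     # each group's indices reversed (so indices are descending within a value).
--     buckets = {}
--     for k, x in enumerate(i):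
--         v = int(x)
--         if v >= 0:
--             buckets.setdefault(v, []).append(k)
--     out = []
--     for v in sorted(buckets, reverse=True):
--         out.extend(reversed(buckets[v]))
--     return out
-- ===== Notes on version B (the rewrite author's own statement) =====
-- stated objective: faster
-- what changed: Replaces A's rescan of the whole list for every candidate value from the maximum down to zero (plus a per-value sort) by a single pass that buckets indices by value in a dict, then emits the buckets by sorted key descending with each bucket reversed.
-- crash fix: On the empty list A raises IndexError (it indexes the first element of the sorted copy); B naturally returns an empty list. — e.g. on levels([]): A raises IndexError, B returns []
import Mathlib
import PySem

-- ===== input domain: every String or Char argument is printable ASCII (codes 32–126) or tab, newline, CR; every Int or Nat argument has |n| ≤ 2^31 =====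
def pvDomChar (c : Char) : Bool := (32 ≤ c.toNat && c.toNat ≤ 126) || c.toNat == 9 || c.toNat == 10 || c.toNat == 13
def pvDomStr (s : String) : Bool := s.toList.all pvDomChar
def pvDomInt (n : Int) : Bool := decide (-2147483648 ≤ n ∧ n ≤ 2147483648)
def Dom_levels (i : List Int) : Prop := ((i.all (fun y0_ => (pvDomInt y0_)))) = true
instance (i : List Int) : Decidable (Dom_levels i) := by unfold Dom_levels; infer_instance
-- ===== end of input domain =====

-- B buckets indices by value in one dict pass and emits buckets by sorted key descending (each reversed),
-- instead of A's rescan of the whole list for every candidate value from the maximum down to zero.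

-- ===== PORT A =====
def levels (i : List Int) : List Int :=
  let mx := PySem.List.pyGetD (PySem.List.sorted i (fun x => x) true) 0 0  -- sorted(i, reverse=True), first element; in range under Pre_
  (PySem.List.pyRange (mx + 1) 0 (-1)).foldl (fun out j =>
    let P := (PySem.List.pyRange 0 (i.length : Int) 1).foldl (fun P k =>
      if PySem.List.pyGetD i k 0 = j - 1 then P ++ [k] else P) []
    out ++ PySem.List.sorted P (fun x => x) true) []

-- ===== PORT B =====
def levels_alt (i : List Int) : List Int :=
  let buckets := (PySem.List.enumerate i 0).foldl (fun d p =>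
    if 0 ≤ p.2 then PySem.Dict.modify d p.2 [] (· ++ [p.1]) else d) PySem.Dict.empty
  (PySem.List.sorted buckets.keys (fun x => x) true).foldl (fun out v =>
    out ++ (buckets.getD v []).reverse) []

-- ===== PRECONDITION & SPEC =====
def Pre_levels (i : List Int) : Prop := i ≠ []
instance (i : List Int) : Decidable (Pre_levels i) := by unfold Pre_levels; infer_instance
def pvWitness_levels : List Int := [2, 0, 2, 1]

-- On the empty list A raises IndexError (it indexes the first element of the sorted copy); B naturally returns an empty list.
def Raises_levels (i : List Int) : Prop := i = []
instance (i : List Int) : Decidable (Raises_levels i) := by unfold Raises_levels; infer_instance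
def pvRaiseWitness_levels : List Int := []
def pvRaiseWitnessOut_levels : List Int := []

def Spec_levels (i : List Int) (out : List Int) : Prop := out = levels_alt i
instance (i : List Int) (out : List Int) : Decidable (Spec_levels i out) := by unfold Spec_levels; infer_instance

-- ===== CLAIM (what is proved, stated in full; the proofs are below) =====
def Claim_equal_levels : Prop := ∀ (i : List Int), Dom_levels i → Pre_levels i → Spec_levels i (levels i)
def Claim_raises_levels : Prop := (∀ (i : List Int), Dom_levels i → Raises_levels i → ¬ Pre_levels i) ∧ (Dom_levels (pvRaiseWitness_levels) ∧ Raises_levels (pvRaiseWitness_levels) ∧ levels_alt (pvRaiseWitness_levels) = pvRaiseWitnessOut_levels)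

-- ===== LEMMAS AND PROOFS =====

-- the ascending list of indices of i holding value v
def idxs (i : List Int) (v : Int) : List Int :=
  (PySem.List.pyRange 0 (i.length : Int) 1).filter (fun k => decide (PySem.List.pyGetD i k 0 = v))

theorem pairwise_lt_idxs (i : List Int) (v : Int) : (idxs i v).Pairwise (· < ·) :=
  (PySem.List.pairwise_lt_pyRange_one 0 (i.length : Int)).filter _

theorem sorted_rev_idxs (i : List Int) (v : Int) :
    PySem.List.sorted (idxs i v) (fun x => x) true = (idxs i v).reverse := by
  apply PySem.List.sorted_rev_eq_of_perm_of_pairwise_gt _ _ _ (List.reverse_perm _)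
  rw [List.pairwise_reverse]
  exact pairwise_lt_idxs i v

theorem idxs_ne_nil_iff (i : List Int) (v : Int) : (¬ idxs i v = []) ↔ v ∈ i := by
  conv_rhs => rw [← PySem.List.map_pyGetD_pyRange_zero' i 0]
  rw [List.mem_map]
  unfold idxs
  rw [List.filter_eq_nil_iff]
  push Not
  simp

-- dropping values whose index list is empty does not change the flatMap
theorem flatMap_eq_flatMap_filter {α : Type} (g : Int → List α) (l : List Int) :
    l.flatMap g = (l.filter (fun v => decide (g v ≠ []))).flatMap g := by
  induction l with
  | nil => rfl
  | cons x t ih =>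
    rw [List.flatMap_cons, List.filter_cons]
    by_cases h : g x = []
    · simp [h, ih]
    · simp [h, List.flatMap_cons, ih]

theorem levels_eq_flatMap (i : List Int) :
    levels i = (PySem.List.pyRange
        (PySem.List.pyGetD (PySem.List.sorted i (fun x => x) true) 0 0 + 1) 0 (-1)).flatMap
      (fun j => (idxs i (j - 1)).reverse) := by
  unfold levels
  rw [PySem.List.foldl_append_eq_flatMap, List.nil_append]
  congr 1
  funext j
  rw [PySem.List.foldl_append_ite_eq_filter (fun k => PySem.List.pyGetD i k 0 = j - 1),
    List.nil_append]
  exact sorted_rev_idxs i (j - 1)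

theorem getD_buckets (i : List Int) (v : Int) (hv : 0 ≤ v) :
    (((PySem.List.enumerate i 0).filter (fun p => decide (0 ≤ p.2))).foldl
       (fun d p => PySem.Dict.modify d p.2 [] (· ++ [p.1])) PySem.Dict.empty).getD v []
      = idxs i v := by
  have hswap : ((PySem.List.enumerate i 0).filter (fun p => decide (0 ≤ p.2))).foldl
       (fun d p => PySem.Dict.modify d p.2 [] (· ++ [p.1])) PySem.Dict.empty
      = (((PySem.List.enumerate i 0).filter (fun p => decide (0 ≤ p.2))).map
          (fun p => (p.2, p.1))).foldl
       (fun d q => PySem.Dict.modify d q.1 [] (· ++ [q.2])) PySem.Dict.empty := by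
    rw [List.foldl_map]
  rw [hswap, PySem.Dict.getD_foldl_modify_append, PySem.Dict.getD_empty, List.nil_append]
  rw [PySem.List.enumerate_eq_map_pyRange i 0]
  unfold idxs
  simp only [List.filter_map, List.map_map, Function.comp_def]
  rw [List.filter_filter]
  simp only [PySem.List.len]
  have : ∀ k ∈ PySem.List.pyRange 0 (i.length : Int) 1,
      (((PySem.List.pyGetD i k 0) == v) && (decide (0 ≤ PySem.List.pyGetD i k 0)))
        = decide (PySem.List.pyGetD i k 0 = v) := by
    intro k _
    by_cases h : PySem.List.pyGetD i k 0 = v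
    · simp [h, hv]
    · simp [h]
  rw [List.filter_congr this]
  simp

theorem levels_alt_eq_flatMap (i : List Int) :
    levels_alt i = (PySem.List.sorted
        (PySem.Set.ofList (((PySem.List.enumerate i 0).filter (fun p => decide (0 ≤ p.2))).map (·.2)))
        (fun x => x) true).flatMap (fun v => (idxs i v).reverse) := by
  unfold levels_alt
  rw [PySem.List.foldl_ite_eq_foldl_filter (p := fun p : Int × Int => 0 ≤ p.2)
        (f := fun (d : PySem.Dict Int (List Int)) (p : Int × Int) => PySem.Dict.modify d p.2 [] (· ++ [p.1]))]
  rw [PySem.List.foldl_append_eq_flatMap, List.nil_append]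
  rw [PySem.Dict.keys_foldl_modify_key (key := fun p : Int × Int => p.2) (d0 := ([] : List Int))
        (f := fun _ p => (· ++ [p.1]))]
  rw [PySem.Dict.keys_empty, PySem.Set.update_nil_left]
  apply List.flatMap_congr
  intro v hv
  have hv0 : 0 ≤ v := by
    rw [PySem.List.mem_sorted, PySem.Set.mem_ofList, List.mem_map] at hv
    obtain ⟨p, hp, hpv⟩ := hv
    rw [List.mem_filter] at hp
    have := hp.2
    simp only [decide_eq_true_eq] at this
    omega
  rw [getD_buckets i v hv0]

-- membership in the bucket key set: the nonnegative values occurring in i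
theorem mem_vals (i : List Int) (x : Int) :
    x ∈ ((PySem.List.enumerate i 0).filter (fun p => decide (0 ≤ p.2))).map (·.2)
      ↔ x ∈ i ∧ 0 ≤ x := by
  simp only [List.mem_map, List.mem_filter, PySem.List.mem_enumerate_iff, decide_eq_true_eq]
  constructor
  · rintro ⟨p, ⟨⟨k, hk, rfl⟩, h0⟩, rfl⟩
    exact ⟨List.mem_iff_getElem.mpr ⟨k, hk, rfl⟩, h0⟩
  · rintro ⟨hx, h0⟩
    obtain ⟨k, hk, rfl⟩ := List.mem_iff_getElem.mp hx
    exact ⟨(0 + (k : Int), i[k]), ⟨⟨k, hk, rfl⟩, h0⟩, rfl⟩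

-- ===== VERDICT (by name: the statement is the Claim_ definition above) =====
theorem levels_spec : Claim_equal_levels := by
  unfold Claim_equal_levels
  intro i _ hpre
  unfold Spec_levels
  obtain ⟨m, t, hs⟩ : ∃ m t, PySem.List.sorted i (fun x => x) true = m :: t := by
    cases h : PySem.List.sorted i (fun x => x) true with
    | nil => exact absurd ((PySem.List.sorted_eq_nil_iff i _ true).mp h) hpre
    | cons m t => exact ⟨m, t, rfl⟩
  have hmax : ∀ y ∈ i, y ≤ m := PySem.List.key_head_sorted_rev_ge i (fun x => x) hs
  rw [levels_eq_flatMap, levels_alt_eq_flatMap, hs, PySem.List.pyGetD_zero_cons]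
  rw [← List.flatMap_map (fun j : Int => j - 1) (fun v => (idxs i v).reverse)]
  rw [flatMap_eq_flatMap_filter (fun v => (idxs i v).reverse)
        ((PySem.List.pyRange (m + 1) 0 (-1)).map (fun j => j - 1))]
  rw [flatMap_eq_flatMap_filter (fun v => (idxs i v).reverse)
        (PySem.List.sorted (PySem.Set.ofList _) (fun x => x) true)]
  congr 1
  -- both filtered value lists are strictly decreasing with the same members
  have hgtL : ((PySem.List.pyRange (m + 1) 0 (-1)).map (fun j : Int => j - 1)).Pairwise
      (fun a b => b < a) := by
    rw [List.pairwise_map, PySem.List.pyRange_neg_one_eq_reverse, List.pairwise_reverse]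
    exact (PySem.List.pairwise_lt_pyRange_one 1 (m + 1 + 1)).imp (by omega)
  have hgtK : (PySem.List.sorted (PySem.Set.ofList
      (((PySem.List.enumerate i 0).filter (fun p => decide (0 ≤ p.2))).map (·.2)))
      (fun x => x) true).Pairwise (fun a b : Int => b < a) := by
    have h1 := PySem.List.sorted_pairwise_rev (PySem.Set.ofList
      (((PySem.List.enumerate i 0).filter (fun p => decide (0 ≤ p.2))).map (·.2))) (fun x : Int => x)
    have h2 : (PySem.List.sorted (PySem.Set.ofList
        (((PySem.List.enumerate i 0).filter (fun p => decide (0 ≤ p.2))).map (·.2)))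
        (fun x : Int => x) true).Nodup :=
      ((PySem.List.sorted_perm _ _ _).nodup_iff).mpr (PySem.Set.nodup_ofList _)
    exact (h1.and h2).imp (by rintro a b ⟨hle, hne⟩; omega)
  apply List.Perm.eq_of_pairwise (le := fun a b : Int => b ≤ a)
  · intro a b _ _ h1 h2; omega
  · exact (hgtL.imp (by omega)).filter _
  · exact (hgtK.imp (by omega)).filter _
  · rw [List.perm_ext_iff_of_nodup ((hgtL.imp (by intro a b h; omega)).filter _)
          ((hgtK.imp (by intro a b h; omega)).filter _)]
    intro x
    rw [List.mem_filter, List.mem_filter, PySem.List.mem_sorted, PySem.Set.mem_ofList, mem_vals]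
    simp only [List.mem_map, PySem.List.mem_pyRange_neg_one, decide_eq_true_eq,
      List.reverse_eq_nil_iff, ne_eq, idxs_ne_nil_iff]
    constructor
    · rintro ⟨⟨j, ⟨hj0, hjm⟩, rfl⟩, hmem⟩
      exact ⟨⟨hmem, by omega⟩, hmem⟩
    · rintro ⟨⟨hmem, h0⟩, _⟩
      exact ⟨⟨x + 1, ⟨by omega, by have := hmax x hmem; omega⟩, by omega⟩, hmem⟩

def levels_raises : Claim_raises_levels := by
  unfold Claim_raises_levels
  exact ⟨fun i _ h hp => hp h, by decide⟩
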